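-- pv_equiv track=rewrite | github.com/CodingTestKiller/Season1 | 이분탐색/징검다리건너기-22871/7ngenious.py | min_power
-- ===== SOURCE A (Python) =====
-- def min_power(N, A):
--     INF = 4000000001
--     dp = [0] + [INF] * (N - 1)
--
--     for i in range(1, N):
--         for j in range(i):
--             power = max((i - j) * (1 + abs(A[i] - A[j])), dp[j])
--             dp[i] = min(dp[i], power)
--
--     return dp[N - 1]
-- ===== SOURCE B (Python) =====
-- def min_power(N, A):
--     # binary search on the answer: minimal power P in [0, INF] whose jump
--     # graph lets us reach the last stone from stone 0 (forward reachability).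
--     INF = 4000000001
--
--     def feasible(P):
--         reach = [True] + [False] * (N - 1)
--         for i in range(1, N):
--             reach[i] = any(
--                 reach[j] and (i - j) * (1 + abs(A[i] - A[j])) <= P
--                 for j in range(i)
--             )
--         return reach[N - 1]
--
--     lo, hi = 0, INF
--     while lo < hi:
--         mid = (lo + hi) // 2
--         if feasible(mid):
--             hi = mid
--         else:
--             lo = mid + 1
--     return lo
-- ===== Notes on version B (the rewrite author's own statement) =====
-- stated objective: alternative
-- what changed: Replaces the quadratic min-max DP with binary search on the answer: the minimal power P in [0, INF] for which the last stone is forward-reachable in the jump graph restricted to moves of cost <= P.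
import Mathlib
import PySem

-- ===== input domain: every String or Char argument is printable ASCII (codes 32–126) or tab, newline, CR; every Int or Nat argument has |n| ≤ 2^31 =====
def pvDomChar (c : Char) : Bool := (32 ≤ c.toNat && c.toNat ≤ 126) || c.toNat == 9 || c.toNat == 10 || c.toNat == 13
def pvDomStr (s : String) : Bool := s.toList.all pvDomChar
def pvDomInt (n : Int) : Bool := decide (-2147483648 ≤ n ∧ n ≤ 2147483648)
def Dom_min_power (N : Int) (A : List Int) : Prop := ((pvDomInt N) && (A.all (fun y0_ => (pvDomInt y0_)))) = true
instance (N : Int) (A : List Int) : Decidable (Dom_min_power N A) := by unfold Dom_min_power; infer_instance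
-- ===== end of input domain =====

-- B replaces A's quadratic min-max DP by binary search on the answer (feasibility =
-- forward reachability of the last stone); same return value, no speed claim.

-- ===== PORT A =====
-- literal transliteration of A's nested DP loops; dp is a mutable list, indices are
-- Python ints (PySem pyGetD/pySetD are exact on the in-range indices Pre_ guarantees)
def min_power (N : Int) (A : List Int) : Int :=
  let INF : Int := 4000000001
  let dp : List Int := [0] ++ List.replicate (N - 1).toNat INF
  let dp := (PySem.List.pyRange 1 N 1).foldl (fun dp i =>
      (PySem.List.pyRange 0 i 1).foldl (fun dp j =>
        let power := max ((i - j) * (1 + |PySem.List.pyGetD A i 0 - PySem.List.pyGetD A j 0|))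
                         (PySem.List.pyGetD dp j 0)
        PySem.List.pySetD dp i (min (PySem.List.pyGetD dp i 0) power)) dp) dp
  PySem.List.pyGetD dp (N - 1) 0

-- ===== PORT B =====
-- helper feasible(P) of Source B: forward reachability scan
def pvFeasible (N : Int) (A : List Int) (P : Int) : Bool :=
  let reach : List Bool := [true] ++ List.replicate (N - 1).toNat false
  let reach := (PySem.List.pyRange 1 N 1).foldl (fun reach i =>
      PySem.List.pySetD reach i ((PySem.List.pyRange 0 i 1).any (fun j =>
        PySem.List.pyGetD reach j false &&
          decide ((i - j) * (1 + |PySem.List.pyGetD A i 0 - PySem.List.pyGetD A j 0|) ≤ P)))) reach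
  PySem.List.pyGetD reach (N - 1) false

-- the while-loop of Source B, recursion on hi - lo
def pvBsearch (N : Int) (A : List Int) (lo hi : Int) : Int :=
  if h : lo < hi then
    let mid := PySem.Int.floordiv (lo + hi) 2
    if pvFeasible N A mid then pvBsearch N A lo mid
    else pvBsearch N A (mid + 1) hi
  else lo
termination_by (hi - lo).toNat
decreasing_by
  · have h1 : PySem.Int.floordiv (lo + hi) 2 < hi := by
      rw [PySem.Int.floordiv_lt_iff_lt_mul (by omega : (0:Int) < 2)]; omega
    omega
  · have h2 : lo ≤ PySem.Int.floordiv (lo + hi) 2 := by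
      rw [PySem.Int.le_floordiv_iff_mul_le (by omega : (0:Int) < 2)]; omega
    omega

def min_power_alt (N : Int) (A : List Int) : Int :=
  pvBsearch N A 0 4000000001

-- ===== PRECONDITION & SPEC =====
-- Pre_ excludes exactly the inputs where Python A raises IndexError:
-- negative N (dp[N-1] out of range) and N > len(A) (A[i] out of range).
def Pre_min_power (N : Int) (A : List Int) : Prop := 0 ≤ N ∧ N ≤ (A.length : Int)
instance (N : Int) (A : List Int) : Decidable (Pre_min_power N A) := by unfold Pre_min_power; infer_instance

def pvWitness_min_power : Int × List Int := (3, [1, 5, 2])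

def Spec_min_power (N : Int) (A : List Int) (out : Int) : Prop := out = min_power_alt N A
instance (N : Int) (A : List Int) (out : Int) : Decidable (Spec_min_power N A out) := by unfold Spec_min_power; infer_instance

-- ===== CLAIM (what is proved, stated in full; the proofs are below) =====
def Claim_equal_min_power : Prop := ∀ (N : Int) (A : List Int), Dom_min_power N A → Pre_min_power N A → Spec_min_power N A (min_power N A)

-- ===== LEMMAS AND PROOFS =====

-- jump cost between stones j < i (Nat indices into A)
def pvCost (A : List Int) (j i : Nat) : Int :=
  ((i : Int) - (j : Int)) * (1 + |A.getD i 0 - A.getD j 0|)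

-- the DP table of A's algorithm, built stone by stone (capped at INF like A's dp)
def pvDP (A : List Int) : Nat → List Int
  | 0 => []
  | k + 1 =>
    let prev := pvDP A k
    prev ++ [if k = 0 then 0 else
      (List.range k).foldl (fun acc j => min acc (max (pvCost A j k) (prev.getD j 0))) 4000000001]

def pvC (A : List Int) (i : Nat) : Int := (pvDP A (i + 1)).getD i 0

-- reachability table of B's feasibility scan
def pvRch (A : List Int) (P : Int) : Nat → List Bool
  | 0 => []
  | k + 1 =>
    let prev := pvRch A P k
    prev ++ [if k = 0 then true else
      (List.range k).any (fun j => prev.getD j false && decide (pvCost A j k ≤ P))]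

def pvR (A : List Int) (P : Int) (i : Nat) : Bool := (pvRch A P (i + 1)).getD i false

theorem pvDP_length (A : List Int) (k : Nat) : (pvDP A k).length = k := by
  induction k with
  | zero => rfl
  | succ k ih => simp [pvDP, ih]

theorem pvC_getD (A : List Int) (m j : Nat) (h : j < m) : (pvDP A m).getD j 0 = pvC A j := by
  induction m with
  | zero => omega
  | succ m ih =>
    rcases Nat.lt_succ_iff_lt_or_eq.mp h with h' | h'
    · show (pvDP A (m + 1)).getD j 0 = pvC A j
      rw [pvDP]
      rw [List.getD_append _ _ _ _ (by rw [pvDP_length]; exact h')]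
      exact ih h'
    · subst h'; rfl

theorem pvRch_length (A : List Int) (P : Int) (k : Nat) : (pvRch A P k).length = k := by
  induction k with
  | zero => rfl
  | succ k ih => simp [pvRch, ih]

theorem pvR_getD (A : List Int) (P : Int) (m j : Nat) (h : j < m) :
    (pvRch A P m).getD j false = pvR A P j := by
  induction m with
  | zero => omega
  | succ m ih =>
    rcases Nat.lt_succ_iff_lt_or_eq.mp h with h' | h'
    · show (pvRch A P (m + 1)).getD j false = pvR A P j
      rw [pvRch]
      rw [List.getD_append _ _ _ _ (by rw [pvRch_length]; exact h')]
      exact ih h'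
    · subst h'; rfl

theorem pvC_zero (A : List Int) : pvC A 0 = 0 := by rfl

theorem pvC_succ (A : List Int) (k : Nat) (hk : k ≠ 0) :
    pvC A k = (List.range k).foldl (fun acc j => min acc (max (pvCost A j k) (pvC A j))) 4000000001 := by
  unfold pvC
  rw [pvDP]
  simp only [if_neg hk]
  rw [show ∀ v : Int, (pvDP A k ++ [v]).getD k 0 = v by
    intro v
    have hl := pvDP_length A k
    simp [List.getD, hl]]
  refine PySem.List.foldl_congr_mem _ _ _ _ ?_
  intro acc j hj
  rw [pvC_getD A (j + 1) j (Nat.lt_succ_self j), pvC_getD A k j (List.mem_range.mp hj)]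

theorem pv_any_congr_mem {α : Type} (l : List α) (p q : α → Bool)
    (h : ∀ x ∈ l, p x = q x) : l.any p = l.any q := by
  induction l with
  | nil => rfl
  | cons a l ih =>
    simp only [List.any_cons]
    rw [h a (List.mem_cons_self), ih (fun x hx => h x (List.mem_cons_of_mem a hx))]

theorem pvR_zero (A : List Int) (P : Int) : pvR A P 0 = true := by rfl

theorem pvR_succ (A : List Int) (P : Int) (k : Nat) (hk : k ≠ 0) :
    pvR A P k = (List.range k).any (fun j => pvR A P j && decide (pvCost A j k ≤ P)) := by
  unfold pvR
  rw [pvRch]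
  simp only [if_neg hk]
  rw [show ∀ v : Bool, (pvRch A P k ++ [v]).getD k false = v by
    intro v
    have hl := pvRch_length A P k
    simp [List.getD, hl]]
  refine pv_any_congr_mem _ _ _ ?_
  intro j hj
  rw [pvR_getD A P (j + 1) j (Nat.lt_succ_self j), pvR_getD A P k j (List.mem_range.mp hj)]

-- fold-min bracket: the running min is ≤ P iff the seed or some element is
theorem pv_foldl_min_le {α : Type} (l : List α) (f : α → Int) (init P : Int) :
    l.foldl (fun acc x => min acc (f x)) init ≤ P ↔ init ≤ P ∨ ∃ x ∈ l, f x ≤ P := by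
  induction l generalizing init with
  | nil => simp
  | cons a l ih =>
    rw [List.foldl_cons, ih]
    simp only [min_le_iff, List.mem_cons]
    constructor
    · rintro (( h | h) | ⟨x, hx, h⟩)
      · exact Or.inl h
      · exact Or.inr ⟨a, Or.inl rfl, h⟩
      · exact Or.inr ⟨x, Or.inr hx, h⟩
    · rintro (h | ⟨x, (rfl | hx), h⟩)
      · exact Or.inl (Or.inl h)
      · exact Or.inl (Or.inr h)
      · exact Or.inr ⟨x, hx, h⟩

theorem pvCost_pos (A : List Int) (j i : Nat) (h : j < i) : 0 < pvCost A j i := by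
  unfold pvCost
  have h1 : (0:Int) < (i : Int) - (j : Int) := by
    have : (j : Int) < (i : Int) := by exact_mod_cast h
    omega
  have h2 : (0:Int) < 1 + |A.getD i 0 - A.getD j 0| := by
    have := abs_nonneg (A.getD i 0 - A.getD j 0); omega
  exact mul_pos h1 h2

theorem pvC_nonneg (A : List Int) (i : Nat) : 0 ≤ pvC A i := by
  induction i using Nat.strong_induction_on with
  | _ i ih =>
    rcases Nat.eq_zero_or_pos i with h | h
    · subst h; rw [pvC_zero]
    · rw [pvC_succ A i (by omega)]
      rw [show (fun (acc : Int) (j : Nat) => min acc (max (pvCost A j i) (pvC A j))) =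
          (fun acc x => min acc ((fun j => max (pvCost A j i) (pvC A j)) x)) from rfl,
        ← List.foldl_map]
      rcases PySem.List.foldl_min_mem ((List.range i).map (fun j => max (pvCost A j i) (pvC A j))) (4000000001 : Int) with hm | hm
      · rw [hm]; norm_num
      · obtain ⟨j, hj, hje⟩ := List.mem_map.mp hm
        rw [← hje]
        have h1 := pvCost_pos A j i (List.mem_range.mp hj)
        have h2 := ih j (List.mem_range.mp hj)
        exact le_max_of_le_right h2

theorem pvC_le_INF (A : List Int) (i : Nat) : pvC A i ≤ 4000000001 := by
  rcases Nat.eq_zero_or_pos i with h | h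
  · subst h; rw [pvC_zero]; norm_num
  · rw [pvC_succ A i (by omega)]
    rw [show (fun (acc : Int) (j : Nat) => min acc (max (pvCost A j i) (pvC A j))) =
        (fun acc x => min acc ((fun j => max (pvCost A j i) (pvC A j)) x)) from rfl,
      ← List.foldl_map]
    exact (PySem.List.foldl_min_le _ _).1

-- B's reachability at power P is exactly "A's dp value ≤ P" (P below the cap)
theorem pvR_iff (A : List Int) (P : Int) (hP0 : 0 ≤ P) (hP : P < 4000000001) (i : Nat) :
    pvR A P i = decide (pvC A i ≤ P) := by
  induction i using Nat.strong_induction_on with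
  | _ i ih =>
    rcases Nat.eq_zero_or_pos i with h | h
    · subst h; rw [pvR_zero, pvC_zero]; simp [hP0]
    · rw [pvR_succ A P i (by omega), pvC_succ A i (by omega)]
      rw [Bool.eq_iff_iff]
      rw [List.any_eq_true]
      rw [decide_eq_true_eq]
      rw [pv_foldl_min_le (List.range i) (fun j => max (pvCost A j i) (pvC A j)) 4000000001 P]
      constructor
      · rintro ⟨j, hj, hjb⟩
        rw [ih j (List.mem_range.mp hj)] at hjb
        simp only [Bool.and_eq_true, decide_eq_true_eq] at hjb
        exact Or.inr ⟨j, hj, max_le hjb.2 hjb.1⟩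
      · rintro (hI | ⟨j, hj, hjle⟩)
        · omega
        · refine ⟨j, hj, ?_⟩
          rw [ih j (List.mem_range.mp hj)]
          simp only [Bool.and_eq_true, decide_eq_true_eq]
          rw [max_le_iff] at hjle
          exact ⟨hjle.2, hjle.1⟩

-- the inner j-loop of A only ever writes index k, reading index k and indices j < k
theorem pv_inner (g : Nat → Int) (k : Nat) :
    ∀ (js : List Nat) (dp : List Int), (∀ j ∈ js, j < k) → k < dp.length →
    js.foldl (fun dp j => dp.set k (min (dp.getD k 0) (max (g j) (dp.getD j 0)))) dp
      = dp.set k (js.foldl (fun acc j => min acc (max (g j) (dp.getD j 0))) (dp.getD k 0)) := by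
  intro js
  induction js with
  | nil =>
    intro dp _ hk
    simp only [List.foldl_nil]
    rw [show dp.getD k 0 = dp[k]'hk by simp [List.getD, List.getElem?_eq_getElem hk]]
    exact (List.set_getElem_self hk).symm
  | cons j js ih =>
    intro dp h hk
    rw [List.foldl_cons, List.foldl_cons]
    have hj : j < k := h j List.mem_cons_self
    have hrec := ih (dp.set k (min (dp.getD k 0) (max (g j) (dp.getD j 0))))
      (fun x hx => h x (List.mem_cons_of_mem j hx)) (by simpa using hk)
    rw [hrec, List.set_set]
    congr 1
    rw [show (dp.set k (min (dp.getD k 0) (max (g j) (dp.getD j 0)))).getD k 0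
          = min (dp.getD k 0) (max (g j) (dp.getD j 0)) by
        simp [List.getD, List.getElem?_set_self hk]]
    refine PySem.List.foldl_congr_mem _ _ _ _ ?_
    intro acc x hx
    have hxk : x < k := h x (List.mem_cons_of_mem j hx)
    rw [show (dp.set k (min (dp.getD k 0) (max (g j) (dp.getD j 0)))).getD x 0 = dp.getD x 0 by
        simp [List.getD, List.getElem?_set_ne (by omega : k ≠ x)]]

-- loop invariant of A's outer i-loop: after stones 1..k-1 the list is pvDP A k padded with INF
theorem pvA_outer (A : List Int) (n : Nat) :
    ∀ k, 1 ≤ k → k ≤ n →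
    (PySem.List.pyRange 1 (k : Int) 1).foldl
      (fun dp i => (PySem.List.pyRange 0 i 1).foldl
        (fun dp j => PySem.List.pySetD dp i (min (PySem.List.pyGetD dp i 0)
          (max ((i - j) * (1 + |PySem.List.pyGetD A i 0 - PySem.List.pyGetD A j 0|))
               (PySem.List.pyGetD dp j 0)))) dp)
      ([0] ++ List.replicate (n - 1) 4000000001)
    = pvDP A k ++ List.replicate (n - k) 4000000001 := by
  intro k
  induction k with
  | zero => omega
  | succ k ih =>
    intro _ hkn
    rcases Nat.eq_zero_or_pos k with hk0 | hk1
    · subst hk0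
      rw [show ((1 : Nat) : Int) = 1 by norm_num, PySem.List.pyRange_one_eq_nil le_rfl]
      rfl
    · have hih := ih hk1 (by omega)
      rw [show ((k + 1 : Nat) : Int) = (k : Int) + 1 by push_cast; ring,
        PySem.List.pyRange_one_succ_right (by exact_mod_cast hk1 : (1:Int) ≤ (k:Int)),
        List.foldl_append, hih]
      simp only [List.foldl_cons, List.foldl_nil]
      rw [PySem.List.pyRange_zero_natCast k, List.foldl_map]
      simp only [PySem.List.pyGetD_natCast, PySem.List.pySetD_natCast]
      have hlen : k < (pvDP A k ++ List.replicate (n - k) 4000000001).length := by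
        rw [List.length_append, pvDP_length, List.length_replicate]; omega
      have hstep := pv_inner
        (fun j => ((k : Int) - (j : Int)) * (1 + |A.getD k 0 - A.getD j 0|)) k
        (List.range k) (pvDP A k ++ List.replicate (n - k) 4000000001)
        (fun j hj => List.mem_range.mp hj) hlen
      simp only [hstep]
      have hnk : n - k = (n - (k + 1)) + 1 := by omega
      rw [hnk, List.replicate_succ]
      have hgetk : (pvDP A k ++ (4000000001 : Int) :: List.replicate (n - (k + 1)) 4000000001).getD k 0
          = 4000000001 := by
        simp [List.getD, pvDP_length]
      rw [hgetk]
      rw [show ∀ v : Int, (pvDP A k ++ (4000000001:Int) :: List.replicate (n - (k + 1)) 4000000001).set k v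
            = pvDP A k ++ v :: List.replicate (n - (k + 1)) 4000000001 by
        intro v; rw [List.set_append]; simp [pvDP_length]]
      rw [pvDP]
      simp only [if_neg (by omega : ¬ k = 0)]
      rw [List.append_assoc]
      simp only [List.singleton_append]
      congr 2
      refine PySem.List.foldl_congr_mem _ _ _ _ ?_
      intro acc j hj
      have hjk : j < k := List.mem_range.mp hj
      rw [List.getD_append _ _ _ _ (by rw [pvDP_length]; exact hjk)]
      rfl

-- loop invariant of B's reachability scan
theorem pvB_outer (A : List Int) (P : Int) (n : Nat) :
    ∀ k, 1 ≤ k → k ≤ n →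
    (PySem.List.pyRange 1 (k : Int) 1).foldl
      (fun reach i => PySem.List.pySetD reach i ((PySem.List.pyRange 0 i 1).any (fun j =>
        PySem.List.pyGetD reach j false &&
          decide ((i - j) * (1 + |PySem.List.pyGetD A i 0 - PySem.List.pyGetD A j 0|) ≤ P))))
      ([true] ++ List.replicate (n - 1) false)
    = pvRch A P k ++ List.replicate (n - k) false := by
  intro k
  induction k with
  | zero => omega
  | succ k ih =>
    intro _ hkn
    rcases Nat.eq_zero_or_pos k with hk0 | hk1
    · subst hk0
      rw [show ((1 : Nat) : Int) = 1 by norm_num, PySem.List.pyRange_one_eq_nil le_rfl]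
      rfl
    · have hih := ih hk1 (by omega)
      rw [show ((k + 1 : Nat) : Int) = (k : Int) + 1 by push_cast; ring,
        PySem.List.pyRange_one_succ_right (by exact_mod_cast hk1 : (1:Int) ≤ (k:Int)),
        List.foldl_append, hih]
      simp only [List.foldl_cons, List.foldl_nil]
      rw [PySem.List.pyRange_zero_natCast k, List.any_map]
      simp only [PySem.List.pyGetD_natCast, PySem.List.pySetD_natCast]
      have hnk : n - k = (n - (k + 1)) + 1 := by omega
      rw [hnk, List.replicate_succ]
      rw [show ∀ v : Bool, (pvRch A P k ++ false :: List.replicate (n - (k + 1)) false).set k v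
            = pvRch A P k ++ v :: List.replicate (n - (k + 1)) false by
        intro v; rw [List.set_append]; simp [pvRch_length]]
      conv_rhs => rw [pvRch]
      simp only [if_neg (by omega : ¬ k = 0)]
      rw [List.append_assoc]
      simp only [List.singleton_append]
      congr 2
      refine pv_any_congr_mem _ _ _ ?_
      intro j hj
      have hjk : j < k := List.mem_range.mp hj
      simp only [Function.comp_apply, PySem.List.pyGetD_natCast]
      rw [List.getD_append _ _ _ _ (by rw [pvRch_length]; exact hjk)]
      rfl

-- A's port computes pvC A (n-1)
theorem min_power_eq_pvC (N : Int) (A : List Int) (h0 : 0 ≤ N) (hlen : N ≤ (A.length : Int)) :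
    min_power N A = pvC A (N.toNat - 1) := by
  rcases Nat.eq_zero_or_pos N.toNat with hn0 | hn1
  · have hN : N = 0 := by omega
    subst hN
    rfl
  · have hN : N = (N.toNat : Int) := by omega
    set n := N.toNat with hn
    rw [hN]
    simp only [min_power]
    rw [show ((n : Int) - 1).toNat = n - 1 by omega]
    rw [pvA_outer A n n hn1 le_rfl]
    rw [Nat.sub_self, List.replicate_zero, List.append_nil]
    rw [show ((n : Int) - 1) = ((n - 1 : Nat) : Int) by omega]
    rw [PySem.List.pyGetD_natCast]
    exact pvC_getD A n (n - 1) (by omega)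

-- B's feasibility scan computes pvR A P (n-1)
theorem pvFeasible_eq_pvR (N : Int) (A : List Int) (P : Int) (h0 : 0 ≤ N) (hlen : N ≤ (A.length : Int)) :
    pvFeasible N A P = pvR A P (N.toNat - 1) := by
  rcases Nat.eq_zero_or_pos N.toNat with hn0 | hn1
  · have hN : N = 0 := by omega
    subst hN
    rfl
  · have hN : N = (N.toNat : Int) := by omega
    set n := N.toNat with hn
    rw [hN]
    simp only [pvFeasible]
    rw [show ((n : Int) - 1).toNat = n - 1 by omega]
    rw [pvB_outer A P n n hn1 le_rfl]
    rw [Nat.sub_self, List.replicate_zero, List.append_nil]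
    rw [show ((n : Int) - 1) = ((n - 1 : Nat) : Int) by omega]
    rw [PySem.List.pyGetD_natCast]
    exact pvR_getD A P n (n - 1) (by omega)

-- binary-search correctness
theorem pvBsearch_eq (N : Int) (A : List Int) (t : Int)
    (H : ∀ m : Int, 0 ≤ m → m < 4000000001 → pvFeasible N A m = decide (t ≤ m)) :
    ∀ lo hi : Int, 0 ≤ lo → lo ≤ t → t ≤ hi → hi ≤ 4000000001 → pvBsearch N A lo hi = t := by
  intro lo hi
  have main : ∀ (fuel : Nat) (lo hi : Int), (hi - lo).toNat ≤ fuel → 0 ≤ lo → lo ≤ t → t ≤ hi →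
      hi ≤ 4000000001 → pvBsearch N A lo hi = t := by
    intro fuel
    induction fuel with
    | zero =>
      intro lo hi hf h0 h1 h2 h3
      rw [pvBsearch, dif_neg (by omega)]
      omega
    | succ f ihf =>
      intro lo hi hf h0 h1 h2 h3
      rw [pvBsearch]
      by_cases hlt : lo < hi
      · rw [dif_pos hlt]
        show (if pvFeasible N A (PySem.Int.floordiv (lo + hi) 2) = true
              then pvBsearch N A lo (PySem.Int.floordiv (lo + hi) 2)
              else pvBsearch N A (PySem.Int.floordiv (lo + hi) 2 + 1) hi) = t
        have hmlt : PySem.Int.floordiv (lo + hi) 2 < hi := by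
          rw [PySem.Int.floordiv_lt_iff_lt_mul (by omega : (0:Int) < 2)]; omega
        have hmle : lo ≤ PySem.Int.floordiv (lo + hi) 2 := by
          rw [PySem.Int.le_floordiv_iff_mul_le (by omega : (0:Int) < 2)]; omega
        rw [H _ (by omega) (by omega)]
        by_cases ht : t ≤ PySem.Int.floordiv (lo + hi) 2
        · rw [if_pos (by simpa using ht)]
          exact ihf lo _ (by omega) h0 h1 ht (by omega)
        · rw [if_neg (by simpa using ht)]
          exact ihf _ hi (by omega) (by omega) (by omega) h2 h3
      · rw [dif_neg hlt]; omega
  intro h0 h1 h2 h3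
  exact main (hi - lo).toNat lo hi le_rfl h0 h1 h2 h3

-- ===== VERDICT (by name: the statement is the Claim_ definition above) =====
theorem min_power_spec : Claim_equal_min_power := by
  intro N A _hD hPre
  obtain ⟨h0, hlen⟩ := hPre
  unfold Spec_min_power min_power_alt
  have ht0 : 0 ≤ pvC A (N.toNat - 1) := pvC_nonneg A _
  have htI : pvC A (N.toNat - 1) ≤ 4000000001 := pvC_le_INF A _
  rw [min_power_eq_pvC N A h0 hlen]
  refine (pvBsearch_eq N A _ ?_ 0 4000000001 le_rfl ht0 htI le_rfl).symm
  intro m hm0 hmI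
  rw [pvFeasible_eq_pvR N A m h0 hlen, pvR_iff A m hm0 hmI]
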